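-- pv_equiv track=rewrite | github.com/deidee/defont | tools/generate-data.py | infer_dimensions
-- ===== SOURCE A (Python) =====
-- def infer_dimensions(values: list[int]) -> tuple[int | None, int | None]:
--     """
--     Infer width/height from flat row-major glyph arrays.
--
--     Heuristic (based on your data):
--     - Prefer heights: 9, 7, 5, 3
--     - Fallback to factor pair closest to square
--     """
--     n = len(values)
--     if n == 0:
--         return None, None
--
--     preferred_heights = (9, 7, 5, 3)
--     for h in preferred_heights:
--         if n % h == 0:
--             w = n // h
--             if 1 <= w <= 64:
--                 return w, h
--
--     # Fallback: choose factor pair closest to square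
--     best: tuple[int, int] | None = None
--     best_score: int | None = None
--     for h in range(1, n + 1):
--         if n % h != 0:
--             continue
--         w = n // h
--         score = abs(w - h)
--         if best is None or score < (best_score if best_score is not None else 10**9):
--             best = (w, h)
--             best_score = score
--
--     if best is None:
--         return None, None
--
--     return best
-- ===== SOURCE B (Python) =====
-- def infer_dimensions(values):
--     """Same result as A: the fallback pair closest to square is (n//d, d) where d is
--     the largest divisor of n with d*d <= n, found by scanning only up to sqrt(n)."""
--     n = len(values)
--     if n == 0:
--         return None, None
--
--     for h in (9, 7, 5, 3):
--         if n % h == 0: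
--             w = n // h
--             if 1 <= w <= 64:
--                 return w, h
--
--     # Largest divisor d of n with d*d <= n (always exists: d = 1).
--     d = 1
--     k = 2
--     while k * k <= n:
--         if n % k == 0:
--             d = k
--         k += 1
--     return n // d, d
-- ===== Notes on version B (the rewrite author's own statement) =====
-- stated objective: faster
-- what changed: The O(n) scan over all candidate heights 1..n keeping a running best score is replaced by an O(sqrt(n)) scan for the largest divisor d with d*d <= n, which provably yields A's closest-to-square pair (n//d, d) directly.
import Mathlib
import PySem

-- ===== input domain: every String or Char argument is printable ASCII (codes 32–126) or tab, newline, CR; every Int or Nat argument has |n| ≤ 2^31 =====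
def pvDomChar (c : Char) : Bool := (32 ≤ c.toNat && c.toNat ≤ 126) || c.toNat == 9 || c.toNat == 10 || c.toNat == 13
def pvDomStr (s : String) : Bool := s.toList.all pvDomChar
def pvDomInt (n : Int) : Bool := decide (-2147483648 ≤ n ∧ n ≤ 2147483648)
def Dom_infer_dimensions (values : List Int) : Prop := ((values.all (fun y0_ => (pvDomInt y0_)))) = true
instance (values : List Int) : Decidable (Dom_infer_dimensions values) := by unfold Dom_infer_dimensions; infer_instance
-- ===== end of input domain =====

-- B replaces A's O(n) scan over all heights 1..n by an O(√n) scan for the largest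
-- divisor d with d*d ≤ n, which yields the same closest-to-square pair (n//d, d).

-- ===== PORT A =====
-- body of A's fallback loop, named for the proofs; state = (best, best_score)
def idA_step (n : Int) (st : Option (Int × Int) × Option Int) (h : Int) :
    Option (Int × Int) × Option Int :=
  if PySem.Int.mod n h ≠ 0 then st
  else
    let w := PySem.Int.floordiv n h
    let score := |w - h|
    if st.1 = none ∨ score < st.2.getD (10 ^ 9) then (some (w, h), some score) else st

-- A's loop over the preferred heights, with its early return
def idA_prefer (n : Int) : List Int → Option (Int × Int)
  | [] => none
  | h :: rest =>
      if PySem.Int.mod n h = 0 then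
        let w := PySem.Int.floordiv n h
        if 1 ≤ w ∧ w ≤ 64 then some (w, h) else idA_prefer n rest
      else idA_prefer n rest

def infer_dimensions (values : List Int) : Option Int × Option Int :=
  let n : Int := values.length
  if n = 0 then (none, none)
  else
    match idA_prefer n [9, 7, 5, 3] with
    | some (w, h) => (some w, some h)
    | none =>
        match ((PySem.List.pyRange 1 (n + 1) 1).foldl (idA_step n) (none, none)).1 with
        | none => (none, none)
        | some (w, h) => (some w, some h)

-- ===== PORT B =====
-- B's while loop: scan k = 2, 3, … while k*k ≤ n, keeping the last divisor found
def idB_loop (n k d : Nat) : Nat :=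
  if k * k ≤ n then idB_loop n (k + 1) (if n % k = 0 then k else d) else d
termination_by n + 1 - k * k
decreasing_by
  have : (k + 1) * (k + 1) = k * k + 2 * k + 1 := by ring
  omega

-- B's loop over the preferred heights
def idB_prefer (n : Nat) : List Nat → Option (Nat × Nat)
  | [] => none
  | h :: rest =>
      if n % h = 0 then
        if 1 ≤ n / h ∧ n / h ≤ 64 then some (n / h, h) else idB_prefer n rest
      else idB_prefer n rest

def infer_dimensions_alt (values : List Int) : Option Int × Option Int :=
  let n : Nat := values.length
  if n = 0 then (none, none)
  else
    match idB_prefer n [9, 7, 5, 3] with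
    | some (w, h) => (some (w : Int), some (h : Int))
    | none =>
        let d := idB_loop n 2 1
        (some ((n / d : Nat) : Int), some ((d : Nat) : Int))

-- ===== PRECONDITION & SPEC =====
def Spec_infer_dimensions (values : List Int) (out : Option Int × Option Int) : Prop := out = infer_dimensions_alt values
instance (values : List Int) (out : Option Int × Option Int) : Decidable (Spec_infer_dimensions values out) := by unfold Spec_infer_dimensions; infer_instance

-- ===== CLAIM (what is proved, stated in full; the proofs are below) =====
def Claim_equal_infer_dimensions : Prop := ∀ (values : List Int), Dom_infer_dimensions values → Spec_infer_dimensions values (infer_dimensions values)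

-- ===== LEMMAS AND PROOFS =====

-- greatest divisor of n that is ≤ k and has square ≤ n (1 if none)
def gdiv (n : Nat) : Nat → Nat
  | 0 => 1
  | k + 1 => if (k + 1) ∣ n ∧ (k + 1) * (k + 1) ≤ n then k + 1 else gdiv n k

theorem gdiv_pos (n k : Nat) : 1 ≤ gdiv n k := by
  induction k with
  | zero => simp [gdiv]
  | succ k ih => simp only [gdiv]; split <;> omega

theorem gdiv_dvd (n k : Nat) : gdiv n k ∣ n := by
  induction k with
  | zero => simp [gdiv]
  | succ k ih =>
      simp only [gdiv]
      split
      · tauto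
      · exact ih

theorem gdiv_sq (n : Nat) (hn : 1 ≤ n) (k : Nat) : gdiv n k * gdiv n k ≤ n := by
  induction k with
  | zero => simpa [gdiv] using hn
  | succ k ih =>
      simp only [gdiv]
      split
      · tauto
      · exact ih

theorem gdiv_le1 (n k : Nat) (hk : 1 ≤ k) : gdiv n k ≤ k := by
  induction k with
  | zero => omega
  | succ k ih =>
      simp only [gdiv]; split
      · omega
      · rcases Nat.eq_zero_or_pos k with h0 | h1
        · subst h0; simp [gdiv]
        · exact le_trans (ih h1) (by omega)

theorem gdiv_max (n : Nat) (hn : 1 ≤ n) (k j : Nat) (hd : j ∣ n) (hsq : j * j ≤ n)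
    (hjk : j ≤ k) : j ≤ gdiv n k := by
  induction k with
  | zero =>
      interval_cases j
      · exact absurd (Nat.eq_zero_of_zero_dvd hd) (by omega)
  | succ k ih =>
      simp only [gdiv]
      by_cases hc : (k + 1) ∣ n ∧ (k + 1) * (k + 1) ≤ n
      · rw [if_pos hc]; omega
      · rw [if_neg hc]
        rcases Nat.lt_or_ge j (k + 1) with h | h
        · exact ih (by omega)
        · have hj : j = k + 1 := by omega
          subst hj; exact absurd ⟨hd, hsq⟩ hc

-- at most one greatest divisor: connect B's loop to gdiv n n
theorem idB_loop_eq (n : Nat) (hn : 1 ≤ n) :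
    ∀ m k d, n + 1 - k * k ≤ m → 1 ≤ d → d ∣ n → d * d ≤ n → d < k →
      (∀ j, j ∣ n → j * j ≤ n → j < k → j ≤ d) → idB_loop n k d = gdiv n n := by
  intro m
  induction m with
  | zero =>
      intro k d hm h1 hdvd hsq hdk hmax
      rw [idB_loop]
      have hkk : ¬ k * k ≤ n := by omega
      rw [if_neg hkk]
      refine Nat.le_antisymm ?_ (hmax _ (gdiv_dvd n n) (gdiv_sq n hn n) ?_)
      · exact gdiv_max n hn n d hdvd hsq (Nat.le_of_dvd (by omega) hdvd)
      · by_contra h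
        have : k ≤ gdiv n n := by omega
        have := Nat.mul_le_mul this this
        have := gdiv_sq n hn n
        omega
  | succ m ih =>
      intro k d hm h1 hdvd hsq hdk hmax
      rw [idB_loop]
      by_cases hkk : k * k ≤ n
      · rw [if_pos hkk]
        have hexp : (k + 1) * (k + 1) = k * k + 2 * k + 1 := by ring
        by_cases hk : n % k = 0
        · rw [if_pos hk]
          refine ih (k + 1) k (by omega) (by omega) (Nat.dvd_of_mod_eq_zero hk) hkk
            (by omega) ?_
          intro j hj hjsq hjk
          rcases Nat.lt_or_ge j k with h | h
          · exact le_trans (hmax j hj hjsq h) (by omega)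
          · omega
        · rw [if_neg hk]
          refine ih (k + 1) d (by omega) h1 hdvd hsq (by omega) ?_
          intro j hj hjsq hjk
          rcases Nat.lt_or_ge j k with h | h
          · exact hmax j hj hjsq h
          · have hjeq : j = k := by omega
            subst hjeq
            exact absurd (Nat.mod_eq_zero_of_dvd hj) hk
      · rw [if_neg hkk]
        refine Nat.le_antisymm ?_ (hmax _ (gdiv_dvd n n) (gdiv_sq n hn n) ?_)
        · exact gdiv_max n hn n d hdvd hsq (Nat.le_of_dvd (by omega) hdvd)
        · by_contra h
          have : k ≤ gdiv n n := by omega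
          have := Nat.mul_le_mul this this
          have := gdiv_sq n hn n
          omega

-- A's fallback loop computes (n // gdiv, gdiv)
theorem idA_fold (N : Nat) (hN : 1 ≤ N) :
    ∀ k, 1 ≤ k → k ≤ N →
      (PySem.List.pyRange 1 ((k : Int) + 1) 1).foldl (idA_step (N : Int)) (none, none)
        = (some (((N / gdiv N k : Nat) : Int), ((gdiv N k : Nat) : Int)),
           some (((N / gdiv N k : Nat) : Int) - ((gdiv N k : Nat) : Int))) := by
  intro k
  induction k with
  | zero => omega
  | succ k ih =>
      intro _ hkN
      rcases Nat.eq_zero_or_pos k with hk0 | hk1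
      · subst hk0
        have h2 : (((0 + 1 : Nat)) : Int) + 1 = 1 + 1 := by norm_num
        rw [h2, PySem.List.pyRange_one_singleton]
        have hg : gdiv N (0 + 1) = 1 := by simp only [gdiv]; split <;> rfl
        simp only [List.foldl_cons, List.foldl_nil, idA_step, hg,
          PySem.Int.mod_eq_emod_of_pos (a := (N : Int)) one_pos,
          PySem.Int.floordiv_eq_ediv_of_pos (a := (N : Int)) one_pos,
          Int.emod_one, Int.ediv_one]
        rw [if_neg (by simp), if_pos (by simp)]
        rw [abs_of_nonneg (by omega : (0 : Int) ≤ (N : Int) - 1)]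
        simp
      · -- inductive step: h = k + 1 is appended to the range
        have hsplit : PySem.List.pyRange 1 (((k + 1 : Nat) : Int) + 1) 1
            = PySem.List.pyRange 1 ((k : Int) + 1) 1 ++ [(k : Int) + 1] := by
          have : (((k + 1 : Nat) : Int) + 1) = ((k : Int) + 1) + 1 := by push_cast; ring
          rw [this, PySem.List.pyRange_one_succ_right (by omega)]
        rw [hsplit, List.foldl_append, ih hk1 (by omega)]
        set g : Nat := gdiv N k with hgdef
        have hg1 : 1 ≤ g := gdiv_pos N k
        have hgd : g ∣ N := gdiv_dvd N k
        have hgs : g * g ≤ N := gdiv_sq N hN k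
        have hgk : g ≤ k := gdiv_le1 N k hk1
        have hcast : ((k : Int) + 1) = ((k + 1 : Nat) : Int) := by push_cast; ring
        simp only [List.foldl_cons, List.foldl_nil, idA_step, hcast,
          PySem.Int.mod_natCast, PySem.Int.floordiv_natCast]
        by_cases hdvd : (k + 1) ∣ N
        · have hmod : N % (k + 1) = 0 := Nat.mod_eq_zero_of_dvd hdvd
          rw [if_neg (by simp [hmod])]
          by_cases hsq : (k + 1) * (k + 1) ≤ N
          · have hle : k + 1 ≤ N / (k + 1) := by
              rw [Nat.le_div_iff_mul_le (by omega : 0 < k + 1)]; exact hsq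
            have hdle : N / (k + 1) ≤ N / g := by
              apply Nat.div_le_div_left <;> omega
            have habs : |((N / (k + 1) : Nat) : Int) - ((k + 1 : Nat) : Int)|
                = ((N / (k + 1) : Nat) : Int) - ((k + 1 : Nat) : Int) := by
              apply abs_of_nonneg; omega
            rw [habs, if_pos (Or.inr (by dsimp only [Option.getD_some]; omega))]
            have hgstep : gdiv N (k + 1) = k + 1 := by
              simp only [gdiv]; rw [if_pos ⟨hdvd, hsq⟩]
            rw [hgstep]
          · set c : Nat := N / (k + 1) with hcdef
            have hcpos : 1 ≤ c := Nat.one_le_div_iff (by omega) |>.mpr (by omega)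
            have hc1 : c * (k + 1) = N := Nat.div_mul_cancel hdvd
            have hclt : c < k + 1 := by
              rw [hcdef, Nat.div_lt_iff_lt_mul (by omega)]; omega
            have hcsq : c * c ≤ N := by nlinarith
            have hcd : c ∣ N := ⟨k + 1, hc1.symm⟩
            have hcg : c ≤ g := gdiv_max N hN k c hcd hcsq (by omega)
            have hNc : N / c = k + 1 := by
              rw [show N = c * (k + 1) from hc1.symm, Nat.mul_div_cancel_left _ (by omega)]
            have hdge : N / g ≤ k + 1 := hNc ▸ Nat.div_le_div_left hcg (by omega)
            have habs : |(c : Int) - ((k + 1 : Nat) : Int)| = ((k + 1 : Nat) : Int) - (c : Int) := by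
              rw [abs_of_nonpos (by omega)]; ring
            rw [habs, if_neg (by
              dsimp only [Option.getD_some]
              simp only [reduceCtorEq, false_or, not_lt]
              omega)]
            have hgstep : gdiv N (k + 1) = g := by
              simp only [gdiv]; rw [if_neg (by tauto)]
            rw [hgstep]
        · have hmod : N % (k + 1) ≠ 0 := fun h => hdvd (Nat.dvd_of_mod_eq_zero h)
          rw [if_pos (by exact_mod_cast hmod)]
          have hgstep : gdiv N (k + 1) = g := by
            simp only [gdiv]
            rw [if_neg (by tauto)]
          rw [hgstep]

-- preferred-heights loops agree
theorem prefer_eq (N : Nat) (hs : List Nat) :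
    idA_prefer (N : Int) (hs.map (Nat.cast)) =
      (idB_prefer N hs).map (fun p => ((p.1 : Int), (p.2 : Int))) := by
  induction hs with
  | nil => simp [idA_prefer, idB_prefer]
  | cons h rest ih =>
      simp only [List.map_cons, idA_prefer, idB_prefer,
        PySem.Int.mod_natCast, PySem.Int.floordiv_natCast]
      by_cases h1 : N % h = 0
      · simp only [h1, Nat.cast_zero, reduceIte]
        by_cases h2 : 1 ≤ N / h ∧ N / h ≤ 64
        · rw [if_pos (by exact_mod_cast h2), if_pos h2]
          simp
        · rw [if_neg (by exact_mod_cast h2), if_neg h2]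
          exact ih
      · rw [if_neg (by exact_mod_cast h1), if_neg h1]
        exact ih

-- ===== VERDICT (by name: the statement is the Claim_ definition above) =====
theorem infer_dimensions_spec : Claim_equal_infer_dimensions := by
  intro values _
  unfold Spec_infer_dimensions infer_dimensions infer_dimensions_alt
  set N : Nat := values.length with hNdef
  by_cases h0 : N = 0
  · simp [h0]
  · have hN : 1 ≤ N := by omega
    rw [if_neg (by exact_mod_cast h0), if_neg h0]
    have hp := prefer_eq N [9, 7, 5, 3]
    have hcast : (([9, 7, 5, 3] : List Nat).map (Nat.cast : Nat → Int)) = [9, 7, 5, 3] := by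
      norm_num
    rw [hcast] at hp
    rw [hp]
    cases hB : idB_prefer N [9, 7, 5, 3] with
    | some p => cases p; simp
    | none =>
        simp only [Option.map_none]
        have hfold := idA_fold N hN N hN le_rfl
        rw [hfold]
        have hd : idB_loop N 2 1 = gdiv N N := by
          refine idB_loop_eq N hN (N + 1) 2 1 (by omega) le_rfl (one_dvd N) (by omega)
            (by omega) ?_
          intro j hj hjsq hjk
          interval_cases j
          · exact absurd (Nat.eq_zero_of_zero_dvd hj) (by omega)
          · exact le_rfl
        simp [hd]
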